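-- pv_equiv track=rewrite | github.com/gvmfhy/Webite2025 | scripts/substack-to-qmd.py | wrap_first_paragraph_dropcap
-- ===== SOURCE A (Python) =====
-- def wrap_first_paragraph_dropcap(md: str) -> str:
--     """Wrap the first non-empty content paragraph in ::: {.dropcap} ::: fences."""
--     lines = md.split("\n")
--     out = []
--     in_first = False
--     found = False
--     for line in lines:
--         stripped = line.strip()
--         if not found and stripped and not stripped.startswith(("#", ">", "-", "*", "!", "|", "```", ":")):
--             out.append("::: {.dropcap}")
--             out.append(line)
--             in_first = True
--             found = True
--             continue
--         if in_first:
--             if stripped == "":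
--                 out.append(":::")
--                 out.append(line)
--                 in_first = False
--                 continue
--             out.append(line)
--             continue
--         out.append(line)
--     if in_first:
--         out.append(":::")
--     return "\n".join(out)
-- ===== SOURCE B (Python) =====
-- def wrap_first_paragraph_dropcap(md: str) -> str:
--     """Wrap the first non-empty content paragraph in ::: {.dropcap} ::: fences."""
--     lines = md.split("\n")
--
--     def is_content(line):
--         s = line.strip()
--         return bool(s) and not s.startswith(("#", ">", "-", "*", "!", "|", "```", ":"))
--
--     i = next((k for k, ln in enumerate(lines) if is_content(ln)), None)
--     if i is None:
--         return "\n".join(lines)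
--     j = next((k for k in range(i + 1, len(lines)) if lines[k].strip() == ""), len(lines))
--     return "\n".join(lines[:i] + ["::: {.dropcap}"] + lines[i:j] + [":::"] + lines[j:])
-- ===== Notes on version B (the rewrite author's own statement) =====
-- stated objective: alternative
-- what changed: Replaced the single interleaved pass with two state flags by a locate-then-splice decomposition: find the first content line i and the next blank line j, then rebuild lines[:i] + fence + lines[i:j] + fence + lines[j:].
import Mathlib
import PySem

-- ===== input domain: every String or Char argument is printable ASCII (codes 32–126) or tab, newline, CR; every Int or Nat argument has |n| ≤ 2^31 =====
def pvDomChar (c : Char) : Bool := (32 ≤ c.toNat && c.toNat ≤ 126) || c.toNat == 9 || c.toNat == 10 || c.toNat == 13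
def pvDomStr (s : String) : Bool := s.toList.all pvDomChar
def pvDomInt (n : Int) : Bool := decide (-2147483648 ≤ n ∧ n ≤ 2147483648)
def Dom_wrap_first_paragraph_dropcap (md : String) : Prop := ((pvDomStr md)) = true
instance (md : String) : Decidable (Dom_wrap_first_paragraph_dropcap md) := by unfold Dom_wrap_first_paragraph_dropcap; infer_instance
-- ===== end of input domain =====

-- B replaces A's interleaved single pass with two state flags by a locate-boundaries-then-splice decomposition (same cost, clearer shape).

-- ===== PORT A =====
-- stripped.startswith(("#", ">", "-", "*", "!", "|", "```", ":")) (both Pythons test this tuple)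
def pvStartsAny (s : String) : Bool :=
  PySem.Str.startswith s "#" || PySem.Str.startswith s ">" || PySem.Str.startswith s "-" ||
  PySem.Str.startswith s "*" || PySem.Str.startswith s "!" || PySem.Str.startswith s "|" ||
  PySem.Str.startswith s "```" || PySem.Str.startswith s ":"

-- the loop body of A, state = (out, in_first, found)
def pvStepA (st : List String × Bool × Bool) (line : String) : List String × Bool × Bool :=
  let out := st.1
  let in_first := st.2.1
  let found := st.2.2
  let stripped := PySem.Str.strip line
  if !found && stripped ≠ "" && !pvStartsAny stripped then
    (out ++ ["::: {.dropcap}", line], true, true)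
  else if in_first then
    if stripped = "" then (out ++ [":::", line], false, true)
    else (out ++ [line], true, true)
  else (out ++ [line], in_first, found)

def wrap_first_paragraph_dropcap (md : String) : String :=
  let lines := (PySem.Str.split? md "\n").getD []
  let st := lines.foldl pvStepA ([], false, false)
  let out := if st.2.1 then st.1 ++ [":::"] else st.1
  PySem.Str.join "\n" out

-- ===== PORT B =====
def pvIsContent (line : String) : Bool :=
  let s := PySem.Str.strip line
  s ≠ "" && !pvStartsAny s

def wrap_first_paragraph_dropcap_alt (md : String) : String :=
  let lines := (PySem.Str.split? md "\n").getD []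
  match lines.findIdx? pvIsContent with
  | none => PySem.Str.join "\n" lines
  | some i =>
    let j := match (lines.drop (i + 1)).findIdx? (fun l => PySem.Str.strip l == "") with
             | none => lines.length
             | some k => i + 1 + k
    PySem.Str.join "\n"
      (lines.take i ++ ["::: {.dropcap}"] ++ (lines.drop i).take (j - i) ++ [":::"] ++ lines.drop j)

-- ===== PRECONDITION & SPEC =====
def Spec_wrap_first_paragraph_dropcap (md : String) (out : String) : Prop := out = wrap_first_paragraph_dropcap_alt md
instance (md : String) (out : String) : Decidable (Spec_wrap_first_paragraph_dropcap md out) := by unfold Spec_wrap_first_paragraph_dropcap; infer_instance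

-- ===== CLAIM (what is proved, stated in full; the proofs are below) =====
def Claim_equal_wrap_first_paragraph_dropcap : Prop := ∀ (md : String), Dom_wrap_first_paragraph_dropcap md → Spec_wrap_first_paragraph_dropcap md (wrap_first_paragraph_dropcap md)

-- ===== LEMMAS AND PROOFS =====

-- after the paragraph closed (found = true, in_first = false) the loop only copies lines
lemma foldA_done (out : List String) (lines : List String) :
    lines.foldl pvStepA (out, false, true) = (out ++ lines, false, true) := by
  induction lines generalizing out with
  | nil => simp
  | cons l ls ih => simp [pvStepA, ih]

-- inside the paragraph (in_first = true) the loop copies until the first blank line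
lemma foldA_in (out : List String) (lines : List String) :
    lines.foldl pvStepA (out, true, true) =
      match lines.findIdx? (fun l => PySem.Str.strip l == "") with
      | none => (out ++ lines, true, true)
      | some k => (out ++ lines.take k ++ [":::"] ++ lines.drop k, false, true) := by
  induction lines generalizing out with
  | nil => simp
  | cons l ls ih =>
    by_cases hb : PySem.Str.strip l = ""
    · simp [List.findIdx?_cons, hb, pvStepA, foldA_done]
    · rw [List.foldl_cons]
      have hstep : pvStepA (out, true, true) l = (out ++ [l], true, true) := by
        simp [pvStepA, hb]
      rw [hstep, ih]
      cases h : ls.findIdx? (fun l => PySem.Str.strip l == "") <;>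
        simp [List.findIdx?_cons, h, hb]

-- before the paragraph (found = false) the loop copies until the first content line
lemma foldA_search (out : List String) (lines : List String) :
    lines.foldl pvStepA (out, false, false) =
      match lines.findIdx? pvIsContent with
      | none => (out ++ lines, false, false)
      | some i =>
        match (lines.drop (i + 1)).findIdx? (fun l => PySem.Str.strip l == "") with
        | none => (out ++ lines.take i ++ ["::: {.dropcap}"] ++ lines.drop i, true, true)
        | some k => (out ++ lines.take i ++ ["::: {.dropcap}"] ++ (lines.drop i).take (k + 1)
                       ++ [":::"] ++ lines.drop (i + 1 + k), false, true) := by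
  induction lines generalizing out with
  | nil => simp
  | cons l ls ih =>
    by_cases hc : pvIsContent l
    · have hstep : pvStepA (out, false, false) l = (out ++ ["::: {.dropcap}", l], true, true) := by
        have hc' : (decide (PySem.Str.strip l ≠ "") && !pvStartsAny (PySem.Str.strip l)) = true := by
          simpa [pvIsContent] using hc
        simp [pvStepA]
        simpa using hc'
      rw [List.foldl_cons, hstep, foldA_in]
      simp only [List.findIdx?_cons, hc, if_true]
      cases h : ls.findIdx? (fun l => PySem.Str.strip l == "") with
      | none => simp [h]
      | some k =>
        simp [h, List.take_succ_cons, show (1:ℕ) + k = k + 1 from Nat.add_comm 1 k,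
          List.drop_succ_cons]
    · have hstep : pvStepA (out, false, false) l = (out ++ [l], false, false) := by
        have hc' : (decide (PySem.Str.strip l ≠ "") && !pvStartsAny (PySem.Str.strip l)) = false := by
          simpa [pvIsContent] using hc
        simp [pvStepA]
        intro h1
        simpa [h1] using hc'
      rw [List.foldl_cons, hstep, ih]
      simp only [List.findIdx?_cons, hc, Bool.false_eq_true, if_false]
      cases h : ls.findIdx? pvIsContent with
      | none => simp
      | some i =>
        simp only [Option.map_some]
        cases h2 : (ls.drop (i + 1)).findIdx? (fun l => PySem.Str.strip l == "") <;>
          simp [h2, List.take_succ_cons, List.drop_succ_cons, Nat.add_right_comm]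

-- ===== VERDICT (by name: the statement is the Claim_ definition above) =====
theorem wrap_first_paragraph_dropcap_spec : Claim_equal_wrap_first_paragraph_dropcap := by
  intro md _
  unfold Spec_wrap_first_paragraph_dropcap wrap_first_paragraph_dropcap
    wrap_first_paragraph_dropcap_alt
  set lines := (PySem.Str.split? md "\n").getD [] with hl
  cases h : lines.findIdx? pvIsContent with
  | none => simp [foldA_search, h]
  | some i =>
    cases h2 : (lines.drop (i + 1)).findIdx? (fun l => PySem.Str.strip l == "") with
    | none =>
      have ht : (lines.drop i).take (lines.length - i) = lines.drop i :=
        List.take_of_length_le (by simp)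
      simp [foldA_search, h, h2, ht, List.drop_length]
    | some k =>
      have hk : i + 1 + k - i = k + 1 := by omega
      simp [foldA_search, h, h2, hk]
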